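-- pv_equiv track=rewrite | github.com/weiyinfu/DailyAlgorithm | 幻方/fn_x_y.py | f
-- ===== SOURCE A (Python) =====
-- n = 1
--
-- nn = 2 * n + 1
--
-- def f(x, y):
--     rr = x - y - 1
--     cc = x + y - 1 - 2 * n
--     while rr % 2 != 0 or rr < 0:
--         rr += nn
--     while cc % 2 != 0 or cc < 0:
--         cc += nn
--     return rr // 2 * nn + cc // 2
-- ===== SOURCE B (Python) =====
-- n = 1
--
-- nn = 2 * n + 1
--
-- def _norm(v):
--     # fewest k >= 0 with v + k*nn >= 0
--     k = max(0, -(v // nn))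
--     # k must have the same parity as v so that v + k*nn is even
--     if (k - v) % 2 != 0:
--         k += 1
--     return v + k * nn
--
-- def f(x, y):
--     return _norm(x - y - 1) // 2 * nn + _norm(x + y - 1 - 2 * n) // 2
-- ===== Notes on version B (the rewrite author's own statement) =====
-- stated objective: faster
-- what changed: Replaced each normalizing while-loop (repeatedly adding nn until the value is even and non-negative) with a closed-form computation: the fewest additions k = max(0, -(v//nn)) bumped by one if its parity differs from v's, applied in a helper called for both coordinates.
import Mathlib
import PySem

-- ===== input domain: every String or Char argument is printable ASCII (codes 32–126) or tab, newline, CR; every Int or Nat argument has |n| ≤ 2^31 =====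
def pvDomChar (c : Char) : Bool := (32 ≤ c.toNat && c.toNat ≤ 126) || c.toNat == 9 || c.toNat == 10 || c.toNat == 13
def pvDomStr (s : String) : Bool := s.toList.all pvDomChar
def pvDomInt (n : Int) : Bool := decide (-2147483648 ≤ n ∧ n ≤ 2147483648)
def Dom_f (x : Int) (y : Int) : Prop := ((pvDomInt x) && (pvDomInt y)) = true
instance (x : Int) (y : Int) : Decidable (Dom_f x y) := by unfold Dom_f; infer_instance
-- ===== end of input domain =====

-- B replaces each normalizing while-loop of A by a closed-form O(1) parity/ceiling computation (objective: faster, constant-factor on far-negative inputs).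

-- ===== PORT A =====
-- the while loop `while v % 2 != 0 or v < 0: v += 3` (nn = 3), run on a fuel that
-- provably bounds its iteration count (a totality guard only; the body is the loop body)
def mfuel (v : Int) : Nat :=
  2 * (max 0 (-v)).toNat + (if v % 2 = 0 then 0 else 1)

def normAGo : Nat → Int → Int
  | 0, v => v
  | fuel + 1, v => if v % 2 ≠ 0 ∨ v < 0 then normAGo fuel (v + 3) else v

def normA (v : Int) : Int := normAGo (mfuel v) v

def f (x : Int) (y : Int) : Int :=
  PySem.Int.floordiv (normA (x - y - 1)) 2 * 3
    + PySem.Int.floordiv (normA (x + y - 1 - 2 * 1)) 2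

-- ===== PORT B =====
-- closed form: fewest k ≥ 0 with v + k*3 ≥ 0, bumped by one if its parity differs from v's
def normB (v : Int) : Int :=
  let k0 := max 0 (-(PySem.Int.floordiv v 3))
  let k := if PySem.Int.mod (k0 - v) 2 ≠ 0 then k0 + 1 else k0
  v + k * 3

def f_alt (x : Int) (y : Int) : Int :=
  PySem.Int.floordiv (normB (x - y - 1)) 2 * 3
    + PySem.Int.floordiv (normB (x + y - 1 - 2 * 1)) 2

-- ===== PRECONDITION & SPEC =====
def Spec_f (x : Int) (y : Int) (out : Int) : Prop := out = f_alt x y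
instance (x : Int) (y : Int) (out : Int) : Decidable (Spec_f x y out) := by unfold Spec_f; infer_instance

-- ===== CLAIM (what is proved, stated in full; the proofs are below) =====
def Claim_equal_f : Prop := ∀ (x : Int) (y : Int), Dom_f x y → Spec_f x y (f x y)

-- ===== LEMMAS AND PROOFS =====

-- unfold normB to pure ediv/emod arithmetic (divisors are positive)
theorem normB_eq (v : Int) :
    normB v = v + (if (max 0 (-(v / 3)) - v) % 2 ≠ 0 then max 0 (-(v / 3)) + 1 else max 0 (-(v / 3))) * 3 := by
  simp only [normB]
  rw [PySem.Int.floordiv_eq_ediv_of_pos (by norm_num), PySem.Int.mod_eq_emod_of_pos (by norm_num)]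

-- if the loop condition fails, normB returns v unchanged
theorem normB_fixed (v : Int) (h : ¬ (v % 2 ≠ 0 ∨ v < 0)) : normB v = v := by
  rw [normB_eq]
  have h3 : v / 3 ≥ 0 := Int.ediv_nonneg (by omega) (by norm_num)
  have hk : max 0 (-(v / 3)) = 0 := by omega
  rw [hk]
  split <;> omega

-- if the loop condition holds, one loop step is absorbed by the closed form
theorem normB_step (v : Int) (h : v % 2 ≠ 0 ∨ v < 0) : normB (v + 3) = normB v := by
  rw [normB_eq, normB_eq]
  have h1 : (v + 3) / 3 = v / 3 + 1 := by
    rw [show v + 3 = v + 1 * 3 by ring, Int.add_mul_ediv_right _ _ (by norm_num)]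
  rw [h1]
  have hd := Int.mul_ediv_add_emod v 3
  have hm : 0 ≤ v % 3 ∧ v % 3 < 3 := ⟨Int.emod_nonneg v (by norm_num), Int.emod_lt_of_pos v (by norm_num)⟩
  by_cases hq : 0 ≤ v / 3
  · -- then v ≥ 0, so v is odd; both maxes are 0
    have hv0 : 0 ≤ v := by omega
    have hodd : v % 2 ≠ 0 := by
      rcases h with h | h
      · exact h
      · omega
    have : max 0 (-(v / 3)) = 0 := by omega
    have h2 : max 0 (-(v / 3 + 1)) = 0 := by omega
    rw [this, h2]
    split <;> split <;> omega
  · -- v < 0 : both maxes are the ceilings, differing by one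
    have hneg : max 0 (-(v / 3)) = -(v / 3) := by omega
    by_cases hq1 : v / 3 + 1 ≤ 0
    · have h2 : max 0 (-(v / 3 + 1)) = -(v / 3) - 1 := by omega
      rw [hneg, h2]
      split <;> split <;> omega
    · have h2 : max 0 (-(v / 3 + 1)) = 0 := by omega
      rw [hneg, h2]
      split <;> split <;> omega

-- the fuel strictly exceeds the loop's remaining iteration measure at every continuing step
theorem mfuel_step (v : Int) (h : v % 2 ≠ 0 ∨ v < 0) : mfuel (v + 3) < mfuel v := by
  unfold mfuel; split_ifs <;> omega

theorem normAGo_eq (fuel : Nat) : ∀ v : Int, mfuel v ≤ fuel → normAGo fuel v = normB v := by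
  induction fuel with
  | zero =>
    intro v hv
    have h : ¬ (v % 2 ≠ 0 ∨ v < 0) := by
      unfold mfuel at hv; split_ifs at hv <;> omega
    rw [normAGo, normB_fixed v h]
  | succ fuel ih =>
    intro v hv
    rw [normAGo]
    by_cases h : v % 2 ≠ 0 ∨ v < 0
    · rw [if_pos h, ih (v + 3) (by have := mfuel_step v h; omega), normB_step v h]
    · rw [if_neg h, normB_fixed v h]

theorem norm_eq (v : Int) : normA v = normB v := normAGo_eq (mfuel v) v le_rfl

-- ===== VERDICT (by name: the statement is the Claim_ definition above) =====
theorem f_spec : Claim_equal_f := by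
  intro x y _
  unfold Spec_f f f_alt
  rw [norm_eq, norm_eq]
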